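-- pv_equiv track=rewrite | github.com/destifo/Competitive-Programming | 2007. Find Original Array From Doubled Array/find_original_array.py | findOriginalArray2
-- ===== SOURCE A (Python) =====
-- def findOriginalArray2(changed):
--     changed_length = len(changed)
--     changed.sort()
--     zero_count = 0
--     for num in changed:
--         if num != 0:
--             break
--         zero_count +=1
--     if zero_count % 2 != 0:
--         return []
--     if zero_count == len(changed):
--         return [0] * int(len(changed)/2)
--     unchanged = list()
--     i = 0
--     is_changed = True
--     while (i < len(changed)):
--         num = changed[i]
--         if (num * 2) in changed:
--             unchanged.append(num)
--             changed.pop(i)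
--             changed.remove(num*2)
--             i = 0
--             continue
--         is_changed = False
--         break
--     if is_changed == False:
--         return []
--     if len(changed) !=0:
--         return []
--
--     return unchanged
-- ===== SOURCE B (Python) =====
-- def findOriginalArray2(changed):
--     # Sort a copy + hash-counter greedy: match each smallest remaining value to its
--     # double in one pass; unlike A, does not mutate the argument.
--     s = sorted(changed)
--     cnt = {}
--     for x in s:
--         cnt[x] = cnt.get(x, 0) + 1
--     res = []
--     for x in s:
--         if cnt[x] == 0:
--             continue
--         cnt[x] -= 1
--         if cnt.get(2 * x, 0) == 0:
--             return []
--         cnt[2 * x] -= 1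
--         res.append(x)
--     return res
-- ===== Notes on version B (the rewrite author's own statement) =====
-- stated objective: alternative
-- what changed: A repeatedly rescans and mutates the sorted list (membership test, pop, remove, restart from index 0) plus special-cased zero handling; B sorts a copy once, builds a hash counter, and does a single left-to-right pass matching each smallest remaining value to its double, with no special cases and no mutation of the argument.
import Mathlib
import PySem

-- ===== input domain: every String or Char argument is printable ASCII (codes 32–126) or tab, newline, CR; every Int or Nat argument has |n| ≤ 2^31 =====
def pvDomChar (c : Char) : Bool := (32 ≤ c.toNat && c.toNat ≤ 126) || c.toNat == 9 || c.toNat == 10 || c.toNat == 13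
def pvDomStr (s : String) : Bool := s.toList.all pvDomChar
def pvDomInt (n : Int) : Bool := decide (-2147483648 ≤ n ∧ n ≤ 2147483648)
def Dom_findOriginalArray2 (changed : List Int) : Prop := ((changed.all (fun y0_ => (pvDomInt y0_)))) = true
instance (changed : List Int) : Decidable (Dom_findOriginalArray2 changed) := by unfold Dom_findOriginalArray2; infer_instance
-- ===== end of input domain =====

-- B replaces A's repeated scan/pop/remove/restart over the mutated sorted list by a sort plus a
-- single counter-driven pass (objective: alternative). A sorts its argument in place; B does not
-- mutate it — the equivalence proved here is about the return value only.

-- ===== PORT A =====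
-- leading-zero counter: 'for num in changed: if num != 0: break; zero_count += 1'
def findOriginalArray2Zc : List Int → Nat
  | [] => 0
  | num :: rest => if num ≠ 0 then 0 else findOriginalArray2Zc rest + 1

-- termination helper for the while-loop (and for gA below): a successful remove shortens by one
theorem pvRemoveLen {v : Int} {l l' : List Int} (h : PySem.List.remove? l v = some l') :
    l'.length + 1 = l.length := by
  have hv : v ∈ l := by
    by_contra hv
    rw [(PySem.List.remove?_eq_none_iff l v).mpr hv] at h
    simp at h
  rw [PySem.List.remove?_eq_some_erase l v hv] at h
  cases h
  have := List.length_erase_of_mem hv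
  have : 1 ≤ l.length := List.length_pos_of_mem hv
  omega

-- A's while-loop: state (changed, unchanged, is_changed); i is reset to 0 after every match
def findOriginalArray2Loop (changed unchanged : List Int) (i : Nat) :
    List Int × List Int × Bool :=
  if h : i < changed.length then
    let num := PySem.List.pyGetD changed (i : Int) 0
    if (num * 2) ∈ changed then
      match hp : PySem.List.pop? changed (i : Int) with
      | some (_, c1) =>
        match hr : PySem.List.remove? c1 (num * 2) with
        | some c2 => findOriginalArray2Loop c2 (unchanged ++ [num]) 0
        | none =>
          -- Python raises ValueError here; unreachable from findOriginalArray2's entry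
          -- (the membership test plus the zero-parity pre-check guarantee a partner)
          (c1, unchanged, false)
      | none => (changed, unchanged, false)  -- unreachable: i < len(changed)
    else (changed, unchanged, false)         -- is_changed = False; break
  else (changed, unchanged, true)
termination_by changed.length
decreasing_by
  have h1 := PySem.List.length_of_pop?_eq_some _ hp
  have h2 := pvRemoveLen hr
  simp at h1
  omega

def findOriginalArray2 (changed : List Int) : List Int :=
  let changed := PySem.List.sorted changed (fun x => x) false
  let zero_count := findOriginalArray2Zc changed
  if zero_count % 2 ≠ 0 then []
  else if zero_count = changed.length then
    -- [0] * int(len(changed)/2): the length is even on this branch, so int(len/2) = len / 2 exactly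
    List.replicate (changed.length / 2) 0
  else
    let r := findOriginalArray2Loop changed [] 0
    if r.2.2 = false then []
    else if r.1 ≠ [] then []
    else r.2.1

-- ===== PORT B =====
-- single pass over the sorted list, driven by a counter of the not-yet-consumed elements
def findOriginalArray2AltLoop : List Int → PySem.Dict Int Int → List Int → List Int
  | [], _, res => res
  | x :: rest, cnt, res =>
    if cnt.getD x 0 == 0 then findOriginalArray2AltLoop rest cnt res
    else
      let cnt' := cnt.insert x (cnt.getD x 0 - 1)
      if cnt'.getD (2 * x) 0 == 0 then []
      else findOriginalArray2AltLoop rest (cnt'.insert (2 * x) (cnt'.getD (2 * x) 0 - 1)) (res ++ [x])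

def findOriginalArray2_alt (changed : List Int) : List Int :=
  let s := PySem.List.sorted changed (fun x => x) false
  let cnt := s.foldl (fun d x => d.insert x (d.getD x 0 + 1)) PySem.Dict.empty
  findOriginalArray2AltLoop s cnt []

-- ===== PRECONDITION & SPEC =====
def Spec_findOriginalArray2 (changed : List Int) (out : List Int) : Prop := out = findOriginalArray2_alt changed
instance (changed : List Int) (out : List Int) : Decidable (Spec_findOriginalArray2 changed out) := by unfold Spec_findOriginalArray2; infer_instance

-- ===== CLAIM (what is proved, stated in full; the proofs are below) =====
def Claim_equal_findOriginalArray2 : Prop := ∀ (changed : List Int), Dom_findOriginalArray2 changed → Spec_findOriginalArray2 changed (findOriginalArray2 changed)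

-- ===== LEMMAS AND PROOFS =====

-- canonical greedy on a list: take the head, remove its double, recurse; none = failure
def pvGreedy : List Int → Option (List Int)
  | [] => some []
  | x :: rest =>
    if (x * 2) ∈ (x :: rest) then
      match hr : PySem.List.remove? rest (x * 2) with
      | some r => (pvGreedy r).map (x :: ·)
      | none => none
    else none
termination_by l => l.length
decreasing_by
  have := pvRemoveLen hr
  simp
  omega

theorem pvGreedy_nil : pvGreedy [] = some [] := by rw [pvGreedy]

theorem pvGreedy_cons (x : Int) (rest : List Int) :
    pvGreedy (x :: rest) =
      if (x * 2) ∈ (x :: rest) then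
        match PySem.List.remove? rest (x * 2) with
        | some r => (pvGreedy r).map (x :: ·)
        | none => none
      else none := by
  rw [pvGreedy]
  by_cases hc : (x * 2) ∈ (x :: rest)
  · rw [if_pos hc, if_pos hc]
    split
    · rename_i r hr
      rw [hr]
    · rename_i hr
      rw [hr]
  · rw [if_neg hc, if_neg hc]

-- A's post-loop wrap-up, as it appears inline in findOriginalArray2
def pvPost (r : List Int × List Int × Bool) : List Int :=
  if r.2.2 = false then [] else if r.1 ≠ [] then [] else r.2.1

theorem pvLoop_nil (u : List Int) : findOriginalArray2Loop [] u 0 = ([], u, true) := by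
  rw [findOriginalArray2Loop]
  simp

theorem pvLoop_cons (x : Int) (rest u : List Int) :
    findOriginalArray2Loop (x :: rest) u 0 =
      (if (x * 2) ∈ (x :: rest) then
        match PySem.List.remove? rest (x * 2) with
        | some c2 => findOriginalArray2Loop c2 (u ++ [x]) 0
        | none => (rest, u, false)
      else (x :: rest, u, false)) := by
  rw [findOriginalArray2Loop]
  rw [dif_pos (show 0 < (x :: rest).length by simp)]
  simp only [Nat.cast_zero, PySem.List.pyGetD_zero_cons]
  by_cases hc : (x * 2) ∈ (x :: rest)
  · rw [if_pos hc, if_pos hc]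
    split
    · rename_i fst c1 hp
      rw [Nat.cast_zero, PySem.List.pop?_zero_cons] at hp
      cases hp
      split
      · rename_i c2 hr2
        simp only [Nat.cast_zero, PySem.List.pyGetD_zero_cons] at hr2
        rw [hr2]
      · rename_i hr2
        simp only [Nat.cast_zero, PySem.List.pyGetD_zero_cons] at hr2
        rw [hr2]
    · rename_i hp
      rw [Nat.cast_zero, PySem.List.pop?_zero_cons] at hp
      simp at hp
  · rw [if_neg hc, if_neg hc]

-- A's loop (entered at i = 0) followed by the wrap-up computes the canonical greedy
theorem pvLoop_eq_greedy : ∀ (n : Nat) (c u : List Int), c.length = n →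
    pvPost (findOriginalArray2Loop c u 0) =
      (match pvGreedy c with | some v => u ++ v | none => []) := by
  intro n
  induction n using Nat.strong_induction_on with
  | _ n ih =>
    intro c u hn
    match c with
    | [] => simp [pvLoop_nil, pvGreedy_nil, pvPost]
    | x :: rest =>
      rw [pvLoop_cons, pvGreedy_cons]
      by_cases hc : (x * 2) ∈ (x :: rest)
      · rw [if_pos hc, if_pos hc]
        cases hr : PySem.List.remove? rest (x * 2) with
        | none => simp [pvPost]
        | some c2 =>
          have hlen : c2.length + 1 = rest.length := pvRemoveLen hr
          have hlt : c2.length < n := by simp at hn; omega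
          rw [ih c2.length hlt c2 (u ++ [x]) rfl]
          cases hg : pvGreedy c2 with
          | some v => simp [hg]
          | none => simp [hg]
      · rw [if_neg hc, if_neg hc]
        simp [pvPost]

-- B's pass over a sorted list xs, with cnt holding the multiset m of not-yet-consumed
-- elements (a sorted sub-list of xs), computes the canonical greedy on m
theorem pvAltLoop_eq_greedy :
    ∀ (xs : List Int), List.Pairwise (· ≤ ·) xs →
    ∀ (m : List Int) (cnt : PySem.Dict Int Int) (res : List Int),
      m.Sublist xs → List.Pairwise (· ≤ ·) m →
      (∀ v, cnt.getD v 0 = (m.count v : Int)) →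
      findOriginalArray2AltLoop xs cnt res =
        (match pvGreedy m with | some v => res ++ v | none => []) := by
  intro xs
  induction xs with
  | nil =>
    intro _ m cnt res hsub _ _
    have hm : m = [] := List.sublist_nil.mp hsub
    subst hm
    simp [findOriginalArray2AltLoop, pvGreedy_nil]
  | cons x rest ih =>
    intro hxs m cnt res hsub hm hcnt
    simp only [findOriginalArray2AltLoop]
    rw [show (2 : Int) * x = x * 2 from mul_comm 2 x]
    by_cases hx : m.count x = 0
    · have hcond : (cnt.getD x 0 == 0) = true := by
        rw [hcnt x, hx]; simp
      rw [if_pos hcond]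
      have hxm : x ∉ m := List.count_eq_zero.mp hx
      have hsub' : m.Sublist rest := by
        cases hsub with
        | cons _ h => exact h
        | cons₂ _ _ => exact absurd (List.mem_cons_self ..) hxm
      exact ih hxs.of_cons m cnt res hsub' hm hcnt
    · have hcond : ¬ ((cnt.getD x 0 == 0) = true) := by
        rw [hcnt x]
        simp only [beq_iff_eq, Int.natCast_eq_zero]
        exact hx
      rw [if_neg hcond]
      have hxmem : x ∈ m := List.count_pos_iff.mp (Nat.pos_of_ne_zero hx)
      have hxy : ∀ y ∈ m, x ≤ y := by
        intro y hy
        rcases List.mem_cons.mp (hsub.subset hy) with rfl | hyr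
        · exact le_rfl
        · exact List.rel_of_pairwise_cons hxs hyr
      obtain ⟨m₂, rfl⟩ : ∃ m₂, m = x :: m₂ := by
        cases m with
        | nil => exact absurd hxmem (List.not_mem_nil)
        | cons h0 m₂ =>
          have h1 : x ≤ h0 := hxy h0 (List.mem_cons_self ..)
          have h2 : h0 ≤ x := by
            rcases List.mem_cons.mp hxmem with rfl | hx2
            · exact le_rfl
            · exact List.rel_of_pairwise_cons hm hx2
          exact ⟨m₂, by rw [le_antisymm h2 h1]⟩
      have hsub₂ : m₂.Sublist rest := by
        cases hsub with
        | cons _ h => exact (List.sublist_cons_self x m₂).trans h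
        | cons₂ _ h => exact h
      have hcnt' : ∀ v, (cnt.insert x (cnt.getD x 0 - 1)).getD v 0 = (m₂.count v : Int) := by
        intro v
        rw [PySem.Dict.getD_insert]
        by_cases hvx : v = x
        · subst hvx
          rw [if_pos rfl, hcnt v, List.count_cons_self]
          omega
        · rw [if_neg hvx, hcnt v, List.count_cons_of_ne (Ne.symm hvx)]
      by_cases h2 : m₂.count (x * 2) = 0
      · have hcond2 : ((cnt.insert x (cnt.getD x 0 - 1)).getD (x * 2) 0 == 0) = true := by
          rw [hcnt' (x * 2), h2]; simp
        rw [if_pos hcond2]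
        have hg : pvGreedy (x :: m₂) = none := by
          rw [pvGreedy_cons]
          by_cases hcont : (x * 2) ∈ (x :: m₂)
          · rw [if_pos hcont]
            rw [(PySem.List.remove?_eq_none_iff m₂ (x * 2)).mpr (List.count_eq_zero.mp h2)]
          · rw [if_neg hcont]
        rw [hg]
      · have hmem2 : (x * 2) ∈ m₂ := List.count_pos_iff.mp (Nat.pos_of_ne_zero h2)
        have hcond2 : ¬ (((cnt.insert x (cnt.getD x 0 - 1)).getD (x * 2) 0 == 0) = true) := by
          rw [hcnt' (x * 2)]
          simp only [beq_iff_eq, Int.natCast_eq_zero]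
          exact h2
        rw [if_neg hcond2]
        have hrem : PySem.List.remove? m₂ (x * 2) = some (m₂.erase (x * 2)) :=
          PySem.List.remove?_eq_some_erase m₂ (x * 2) hmem2
        have hcnt'' : ∀ v,
            ((cnt.insert x (cnt.getD x 0 - 1)).insert (x * 2)
              ((cnt.insert x (cnt.getD x 0 - 1)).getD (x * 2) 0 - 1)).getD v 0
              = ((m₂.erase (x * 2)).count v : Int) := by
          intro v
          rw [PySem.Dict.getD_insert]
          by_cases hv : v = x * 2
          · subst hv
            rw [if_pos rfl, hcnt' (v := x * 2), List.count_erase_self]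
            have hpos : 0 < m₂.count (x * 2) := Nat.pos_of_ne_zero h2
            omega
          · rw [if_neg hv, hcnt' v, List.count_erase_of_ne hv]
        have hg : pvGreedy (x :: m₂) = (pvGreedy (m₂.erase (x * 2))).map (x :: ·) := by
          rw [pvGreedy_cons, if_pos (List.mem_cons_of_mem x hmem2), hrem]
        rw [hg]
        have hsubE : (m₂.erase (x * 2)).Sublist rest := (List.erase_sublist ..).trans hsub₂
        have hmE : List.Pairwise (· ≤ ·) (m₂.erase (x * 2)) :=
          hm.of_cons.sublist (List.erase_sublist ..)
        rw [ih hxs.of_cons (m₂.erase (x * 2)) _ (res ++ [x]) hsubE hmE hcnt'']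
        cases hg2 : pvGreedy (m₂.erase (x * 2)) with
        | some v => simp
        | none => simp

-- the greedy consumes zeros only in pairs: an odd number of zeros means failure
theorem pvGreedy_odd : ∀ (n : Nat) (s : List Int), s.length = n →
    s.count 0 % 2 = 1 → pvGreedy s = none := by
  intro n
  induction n using Nat.strong_induction_on with
  | _ n ih =>
    intro s hn hodd
    match s with
    | [] => simp at hodd
    | x :: rest =>
      rw [pvGreedy_cons]
      by_cases hc : (x * 2) ∈ (x :: rest)
      · rw [if_pos hc]
        cases hr : PySem.List.remove? rest (x * 2) with
        | none => rfl
        | some r =>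
          have hmem : (x * 2) ∈ rest := by
            by_contra hmem
            rw [(PySem.List.remove?_eq_none_iff rest (x * 2)).mpr hmem] at hr
            simp at hr
          have hre : r = rest.erase (x * 2) := by
            rw [PySem.List.remove?_eq_some_erase rest (x * 2) hmem] at hr
            exact ((Option.some.injEq ..).mp hr).symm
          have hlen : r.length + 1 = rest.length := pvRemoveLen hr
          have hlt : r.length < n := by simp at hn; omega
          have hro : r.count 0 % 2 = 1 := by
            by_cases hx0 : x = 0
            · subst hx0
              have hx2 : (0 : Int) * 2 = 0 := by norm_num
              rw [hx2] at hre hmem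
              rw [hre, List.count_erase_self]
              rw [List.count_cons_self] at hodd
              have : 0 < rest.count 0 := List.count_pos_iff.mpr hmem
              omega
            · have hx2 : (0 : Int) ≠ x * 2 := by
                intro h
                exact hx0 (by omega)
              rw [hre, List.count_erase_of_ne hx2]
              rw [List.count_cons_of_ne hx0] at hodd
              exact hodd
          simp [ih r.length hlt r rfl hro]
      · rw [if_neg hc]

-- the greedy on an even run of zeros yields half of them
theorem pvGreedy_replicate : ∀ (k : Nat),
    pvGreedy (List.replicate (2 * k) 0) = some (List.replicate k 0) := by
  intro k
  induction k with
  | zero => simpa using pvGreedy_nil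
  | succ k ih =>
    have h1 : 2 * (k + 1) = (2 * k + 1) + 1 := by omega
    rw [h1, List.replicate_succ, List.replicate_succ]
    rw [pvGreedy_cons]
    have hz : (0 : Int) * 2 = 0 := by norm_num
    rw [hz]
    rw [if_pos (List.mem_cons_self ..)]
    rw [PySem.List.remove?_cons_self]
    simp [ih, List.replicate_succ]

-- on a sorted list with a positive number of leading zeros, every zero is leading
theorem pvZc_count : ∀ (s : List Int), List.Pairwise (· ≤ ·) s →
    0 < findOriginalArray2Zc s → s.count 0 = findOriginalArray2Zc s := by
  intro s
  induction s with
  | nil => intro _ h; simp [findOriginalArray2Zc] at h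
  | cons x rest ih =>
    intro hp hpos
    by_cases hx : x = 0
    · subst hx
      rw [findOriginalArray2Zc] at hpos ⊢
      rw [if_neg (by simp)] at hpos ⊢
      rw [List.count_cons_self]
      by_cases hz : 0 < findOriginalArray2Zc rest
      · rw [ih hp.of_cons hz]
      · have hzz : findOriginalArray2Zc rest = 0 := by omega
        have hnz : (0 : Int) ∉ rest := by
          intro hmem
          cases rest with
          | nil => simp at hmem
          | cons y t =>
            have hy0 : y ≠ 0 := by
              intro hy
              rw [findOriginalArray2Zc, if_neg (by simp [hy])] at hzz
              omega
            have hy : 0 ≤ y := List.rel_of_pairwise_cons hp (List.mem_cons_self ..)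
            rcases List.mem_cons.mp hmem with rfl | hmem2
            · exact hy0 rfl
            · have := List.rel_of_pairwise_cons hp.of_cons hmem2
              have : y = 0 := by omega
              exact hy0 this
        rw [List.count_eq_zero.mpr hnz, hzz]
    · rw [findOriginalArray2Zc, if_pos hx] at hpos
      omega

-- leading-zero count equal to the length means the list is all zeros
theorem pvZc_all : ∀ (s : List Int),
    findOriginalArray2Zc s = s.length → s = List.replicate s.length 0 := by
  intro s
  induction s with
  | nil => intro _; rfl
  | cons x rest ih =>
    intro h
    rw [findOriginalArray2Zc] at h
    by_cases hx : x = 0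
    · subst hx
      rw [if_neg (by simp)] at h
      simp only [List.length_cons] at h ⊢
      rw [List.replicate_succ]
      rw [← ih (by omega)]
    · rw [if_pos hx] at h
      simp at h

-- ===== VERDICT (by name: the statement is the Claim_ definition above) =====
theorem findOriginalArray2_spec : Claim_equal_findOriginalArray2 := by
  intro changed _
  unfold Spec_findOriginalArray2
  simp only [findOriginalArray2, findOriginalArray2_alt]
  set s := PySem.List.sorted changed (fun x => x) false with hs
  have hps : List.Pairwise (· ≤ ·) s := PySem.List.sorted_pairwise changed (fun x => x)
  have hcnt : ∀ v,
      (s.foldl (fun d x => d.insert x (d.getD x 0 + 1)) PySem.Dict.empty).getD v 0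
        = (s.count v : Int) := by
    intro v
    rw [PySem.Dict.getD_foldl_insert_add_one]
    simp [PySem.Dict.getD_empty]
  rw [pvAltLoop_eq_greedy s hps s _ [] (List.Sublist.refl s) hps hcnt]
  simp only [List.nil_append]
  by_cases h1 : findOriginalArray2Zc s % 2 ≠ 0
  · rw [if_pos h1]
    have hzpos : 0 < findOriginalArray2Zc s := by omega
    have hodd : s.count 0 % 2 = 1 := by
      rw [pvZc_count s hps hzpos]; omega
    rw [pvGreedy_odd s.length s rfl hodd]
  · rw [if_neg h1]
    by_cases hl : findOriginalArray2Zc s = s.length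
    · rw [if_pos hl]
      have hrep := pvZc_all s hl
      obtain ⟨k, hk⟩ : ∃ k, s.length = 2 * k := ⟨s.length / 2, by omega⟩
      have hg : pvGreedy s = some (List.replicate k 0) := by
        conv_lhs => rw [hrep, hk]
        exact pvGreedy_replicate k
      rw [hg]
      have : s.length / 2 = k := by omega
      rw [this]
    · rw [if_neg hl]
      have hA := pvLoop_eq_greedy s.length s [] rfl
      unfold pvPost at hA
      rw [hA]
      cases hg : pvGreedy s with
      | some v => simp
      | none => simp
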